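-- pv_equiv track=rewrite | github.com/Pranshugoyal/algo-ds-practice | python/Greedy.py | chooseandswap
-- ===== SOURCE A (Python) =====
-- def chooseandswap(A):
-- 	charSet = set()
-- 	firstOrder = []
-- 	for c in A:
-- 		if c not in charSet:
-- 			firstOrder.append(c)
-- 			charSet.add(c)
--
-- 	smallestNext = [None for i in range(len(firstOrder))]
-- 	minYet = firstOrder[-1]
-- 	for i in reversed(range(len(firstOrder[:-1]))):
-- 		if firstOrder[i] <= minYet:
-- 			smallestNext[i] = None
-- 			minYet = firstOrder[i]
-- 		else:
-- 			smallestNext[i] = minYet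
--
-- 	replaceMap = {}
-- 	for i in range(len(firstOrder)):
-- 		if smallestNext[i]:
-- 			replaceMap[firstOrder[i]] = smallestNext[i]
-- 			replaceMap[smallestNext[i]] = firstOrder[i]
-- 			break
--
-- 	res = ""
-- 	for c in A:
-- 		res += replaceMap.get(c, c)
-- 	return res
-- ===== SOURCE B (Python) =====
-- def chooseandswap(A):
--     order = list(dict.fromkeys(A))
--     while order:
--         x = order[0]
--         rest = order[1:]
--         if rest:
--             y = min(rest)
--             if y < x:
--                 return ''.join(y if c == x else x if c == y else c for c in A)
--         order = rest
--     return A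
-- ===== Notes on version B (the rewrite author's own statement) =====
-- stated objective: alternative
-- what changed: Replaces A's backward suffix-minimum array plus replace-dict and incremental string concatenation with a forward scan over the distinct-character list (min of the remaining tail picks the swap pair) and a single join comprehension doing the swap.
-- outside the precondition, e.g. on chooseandswap(''): A raises IndexError, B returns ''
import Mathlib
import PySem

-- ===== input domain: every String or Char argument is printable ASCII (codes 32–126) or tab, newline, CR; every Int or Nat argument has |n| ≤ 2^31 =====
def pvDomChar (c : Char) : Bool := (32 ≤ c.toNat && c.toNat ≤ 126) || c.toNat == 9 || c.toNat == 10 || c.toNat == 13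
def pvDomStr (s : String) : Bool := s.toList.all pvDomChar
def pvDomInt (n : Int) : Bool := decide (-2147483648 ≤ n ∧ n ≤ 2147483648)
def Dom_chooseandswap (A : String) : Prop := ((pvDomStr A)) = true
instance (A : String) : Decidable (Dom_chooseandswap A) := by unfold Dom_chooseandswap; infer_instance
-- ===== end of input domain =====

-- B replaces A's backward suffix-minimum array + replace-dict with a forward scan of the
-- distinct-character list taking min of the remaining tail (an alternative decomposition, not faster).

-- ===== PORT A =====
-- Python's backward index loop filling `smallestNext` (state: array suffix + minYet) as the
-- obvious structural recursion over the list tail; `pvSN x xs` covers firstOrder = x :: xs.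
def pvSN : Char → List Char → List (Option Char) × Char
  | x, [] => ([none], x)
  | x, y :: ys =>
    let p := pvSN y ys
    if x ≤ p.2 then (none :: p.1, x) else (some p.2 :: p.1, p.2)

-- the `for i in range(...): if smallestNext[i]: ...; break` loop over the two parallel lists
def pvBuildMap : List Char → List (Option Char) → PySem.Dict Char Char
  | c :: _, some m :: _ => PySem.Dict.insert (PySem.Dict.insert PySem.Dict.empty c m) m c
  | _ :: cs, none :: ss => pvBuildMap cs ss
  | _, _ => PySem.Dict.empty

def chooseandswap (A : String) : String :=
  let st := A.toList.foldl
      (fun (st : PySem.Set Char × List Char) c =>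
        if PySem.Set.contains st.1 c then st else (PySem.Set.add st.1 c, st.2 ++ [c]))
      (PySem.Set.empty, [])
  match st.2 with
  | [] => ""   -- Python raises IndexError at firstOrder[-1] here; excluded by Pre_
  | x :: xs =>
    let smallestNext := (pvSN x xs).1
    let replaceMap := pvBuildMap (x :: xs) smallestNext
    String.ofList (A.toList.foldl (fun res c => res ++ [PySem.Dict.getD replaceMap c c]) [])

-- ===== PORT B =====
-- forward scan of the distinct list: first char whose minimal successor is strictly smaller
def pvFindSwap : List Char → Option (Char × Char)
  | [] => none
  | x :: rest =>
    match PySem.List.min? rest (fun c => c) with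
    | some y => if y < x then some (x, y) else pvFindSwap rest
    | none => none

def chooseandswap_alt (A : String) : String :=
  match pvFindSwap (PySem.List.dedup A.toList) with
  | some (x, y) => String.ofList (A.toList.map fun c => if c == x then y else if c == y then x else c)
  | none => A

-- ===== PRECONDITION & SPEC =====
-- Pre_ excludes only the empty string, on which A raises IndexError (firstOrder[-1]).
def Pre_chooseandswap (A : String) : Prop := A ≠ ""
instance (A : String) : Decidable (Pre_chooseandswap A) := by unfold Pre_chooseandswap; infer_instance
def pvWitness_chooseandswap : String := "ba"

def Spec_chooseandswap (A : String) (out : String) : Prop := out = chooseandswap_alt A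
instance (A : String) (out : String) : Decidable (Spec_chooseandswap A out) := by unfold Spec_chooseandswap; infer_instance

-- ===== CLAIM (what is proved, stated in full; the proofs are below) =====
def Claim_equal_chooseandswap : Prop := ∀ (A : String), Dom_chooseandswap A → Pre_chooseandswap A → Spec_chooseandswap A (chooseandswap A)

-- ===== LEMMAS AND PROOFS =====

-- A's (seen-set, firstOrder) fold keeps both components equal to the running dedup list
theorem pvFoldPair (l : List Char) (s : List Char) :
    l.foldl
      (fun (st : PySem.Set Char × List Char) c =>
        if PySem.Set.contains st.1 c then st else (PySem.Set.add st.1 c, st.2 ++ [c]))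
      (s, s)
    = (l.foldl PySem.Set.add s, l.foldl PySem.Set.add s) := by
  induction l generalizing s with
  | nil => rfl
  | cons c t ih =>
    by_cases h : PySem.Set.contains s c = true
    · have hm : c ∈ s := by simpa [PySem.Set.contains] using h
      have ha : PySem.Set.add s c = s := by simp [PySem.Set.add, hm]
      simp only [List.foldl_cons, h, if_true, ha]
      exact ih s
    · have hm : c ∉ s := by simpa [PySem.Set.contains] using h
      have ha : PySem.Set.add s c = s ++ [c] := by simp [PySem.Set.add, hm]
      simp only [List.foldl_cons, h, if_false, Bool.false_eq_true, ha]
      exact ih (s ++ [c])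

-- minYet of A's backward loop is the left fold of min
theorem pvSN_min (xs : List Char) : ∀ (x : Char), (pvSN x xs).2 = List.foldl min x xs := by
  induction xs with
  | nil => intro x; rfl
  | cons z zs ih =>
    intro x
    simp only [pvSN, List.foldl_cons]
    rw [List.foldl_assoc (op := min)]
    by_cases h : x ≤ (pvSN z zs).2
    · simp only [if_pos h]
      rw [ih z] at h
      simp [h]
    · simp only [if_neg h]
      rw [ih z] at h ⊢
      simp [le_of_not_ge h]

theorem pvFindSwap_lt (l : List Char) (c m : Char) (h : pvFindSwap l = some (c, m)) : m < c := by
  induction l with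
  | nil => simp [pvFindSwap] at h
  | cons x rest ih =>
    simp only [pvFindSwap] at h
    cases hm : PySem.List.min? rest (fun c => c) with
    | none => simp [hm] at h
    | some y =>
      rw [hm] at h
      by_cases hy : y < x
      · simp only [if_pos hy, Option.some.injEq] at h
        cases h; exact hy
      · simp only [if_neg hy] at h
        exact ih h

-- A's build-map over (firstOrder, smallestNext) computes exactly the dict of B's swap pair
theorem pvPair (xs : List Char) : ∀ (x : Char),
    pvBuildMap (x :: xs) (pvSN x xs).1
    = (match pvFindSwap (x :: xs) with
       | none => PySem.Dict.empty
       | some (c, m) => PySem.Dict.insert (PySem.Dict.insert PySem.Dict.empty c m) m c) := by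
  induction xs with
  | nil => intro x; rfl
  | cons y ys ih =>
    intro x
    have hmin : PySem.List.min? (y :: ys) (fun c => c) = some (List.foldl min y ys) :=
      PySem.List.min?_id_cons y ys
    simp only [pvSN, pvFindSwap, hmin, pvSN_min]
    by_cases h : x ≤ List.foldl min y ys
    · have hlt : ¬ List.foldl min y ys < x := not_lt.mpr h
      simp only [if_pos h, if_neg hlt, pvBuildMap]
      exact ih y
    · have hlt : List.foldl min y ys < x := lt_of_not_ge h
      simp only [if_neg h, if_pos hlt, pvBuildMap]

-- per-character: lookup in the two-entry dict is B's nested conditional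
theorem pvGetD_pair (c x y : Char) (hxy : y < x) :
    PySem.Dict.getD (PySem.Dict.insert (PySem.Dict.insert PySem.Dict.empty x y) y x) c c
    = (if c == x then y else if c == y then x else c) := by
  have hne : y ≠ x := ne_of_lt hxy
  rw [PySem.Dict.getD_insert, PySem.Dict.getD_insert]
  by_cases h1 : c = x
  · simp [h1, Ne.symm hne]
  · by_cases h2 : c = y
    · simp only [h2, beq_self_eq_true, if_true, beq_iff_eq]
      simp [hne]
    · simp [h1, h2, PySem.Dict.getD, PySem.Dict.get?, PySem.Dict.empty]

-- ===== VERDICT (by name: the statement is the Claim_ definition above) =====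
theorem chooseandswap_spec : Claim_equal_chooseandswap := by
  intro A _ hpre
  unfold Spec_chooseandswap chooseandswap chooseandswap_alt
  have hfold := pvFoldPair A.toList []
  simp only [PySem.Set.empty] at hfold ⊢
  rw [hfold]
  have hded : PySem.List.dedup A.toList = A.toList.foldl PySem.Set.add [] := rfl
  rw [← hded]
  cases hd : PySem.List.dedup A.toList with
  | nil =>
    exfalso
    have hA : A.toList ≠ [] := by
      intro h
      apply hpre
      have := congrArg String.ofList h
      rw [String.ofList_toList] at this
      simpa using this
    cases hAl : A.toList with
    | nil => exact hA hAl
    | cons a t =>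
      have : a ∈ PySem.List.dedup A.toList := by
        rw [PySem.List.mem_dedup, hAl]; exact List.mem_cons_self
      rw [hd] at this; exact absurd this (List.not_mem_nil)
  | cons x xs =>
    simp only
    rw [PySem.List.foldl_append_singleton_eq_map, List.nil_append, pvPair]
    cases hf : pvFindSwap (x :: xs) with
    | none =>
      simp only
      have : (A.toList.map fun c => PySem.Dict.getD (PySem.Dict.empty : PySem.Dict Char Char) c c) = A.toList := by
        simp only [PySem.Dict.getD, PySem.Dict.get?, PySem.Dict.empty, List.find?_nil,
          Option.map_none, Option.getD_none, List.map_id']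
      rw [this, String.ofList_toList]
    | some p =>
      obtain ⟨c, m⟩ := p
      have hlt : m < c := pvFindSwap_lt _ _ _ hf
      simp only
      congr 1
      apply List.map_congr_left
      intro a _
      exact pvGetD_pair a c m hlt
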